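-- pv_equiv track=rewrite | github.com/Elmarabtii/EcoLabel-MS-Score-environnemental-des-produits | ParserProduit/app/services/parser_logic.py | guess_ingredients_by_commas
-- ===== SOURCE A (Python) =====
-- def guess_ingredients_by_commas(text: str) -> str:
--     """
--     Devine un bloc d'ingrédients à partir des lignes contenant des virgules/points-virgules.
--     Retourne le plus long bloc contigu.
--     """
--     lines = text.split("\n")
--     candidate_blocks = []
--     current_block = []
--
--     for line in lines:
--         l = line.strip()
--         if ("," in l or ";" in l) and len(l.split()) >= 3:
--             current_block.append(l)
--         else:
--             if current_block:
--                 candidate_blocks.append(" ".join(current_block))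
--                 current_block = []
--
--     if current_block:
--         candidate_blocks.append(" ".join(current_block))
--
--     if not candidate_blocks:
--         return ""
--
--     return max(candidate_blocks, key=len)
-- ===== SOURCE B (Python) =====
-- def guess_ingredients_by_commas(text: str) -> str:
--     """Same result as A, computed run-by-run: tag each stripped line with the
--     predicate, scan maximal runs of tagged lines with two indices, and keep a
--     running longest block instead of collecting all blocks and taking max."""
--     tagged = [(l, ("," in l or ";" in l) and len(l.split()) >= 3)
--               for l in (line.strip() for line in text.split("\n"))]
--     best = ""
--     i, n = 0, len(tagged)
--     while i < n:
--         if tagged[i][1]: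
--             j = i
--             while j < n and tagged[j][1]:
--                 j += 1
--             cand = " ".join(l for l, _ in tagged[i:j])
--             if len(best) < len(cand):
--                 best = cand
--             i = j
--         else:
--             i += 1
--     return best
-- ===== Notes on version B (the rewrite author's own statement) =====
-- stated objective: alternative
-- what changed: Instead of accumulating a list of all candidate blocks and then taking max(key=len), B tags each stripped line with the predicate once, walks the tagged list with two indices consuming each maximal True-run whole, and keeps a single running longest block, so no block list and no separate max pass exist.
import Mathlib
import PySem

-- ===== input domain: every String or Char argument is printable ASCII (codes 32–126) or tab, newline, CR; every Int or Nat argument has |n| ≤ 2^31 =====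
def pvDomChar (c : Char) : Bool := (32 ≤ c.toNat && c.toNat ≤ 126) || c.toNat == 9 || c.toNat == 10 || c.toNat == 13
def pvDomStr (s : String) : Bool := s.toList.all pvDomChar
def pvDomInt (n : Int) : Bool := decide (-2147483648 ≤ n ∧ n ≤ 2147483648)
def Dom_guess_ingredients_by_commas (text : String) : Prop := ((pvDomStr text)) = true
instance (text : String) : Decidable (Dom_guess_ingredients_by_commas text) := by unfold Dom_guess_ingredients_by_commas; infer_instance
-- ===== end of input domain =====

-- B replaces A's collect-all-blocks-then-max(key=len) pass by a single run-by-run scan of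
-- predicate-tagged lines that keeps one running longest block (alternative decomposition, same cost).

-- ===== PORT A =====
-- the line predicate ("," in l or ";" in l) and len(l.split()) >= 3, identical text in both Pythons
def gicPred (l : List Char) : Bool :=
  (PySem.Chars.isIn [','] l || PySem.Chars.isIn [';'] l) && decide (3 ≤ (PySem.Chars.split₀ l).length)

-- one iteration of A's for-loop over (candidate_blocks, current_block)
def gicStep (acc : List (List Char) × List (List Char)) (line : List Char) :
    List (List Char) × List (List Char) :=
  let l := PySem.Chars.strip line
  if gicPred l then
    (acc.1, acc.2 ++ [l])
  else if acc.2 ≠ [] then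
    (acc.1 ++ [PySem.Chars.join [' '] acc.2], [])
  else acc

def guess_ingredients_by_commas (text : String) : String :=
  let lines := PySem.Chars.splitOn text.toList ['\n']
  let st := lines.foldl gicStep ([], [])
  let blocks := if st.2 ≠ [] then st.1 ++ [PySem.Chars.join [' '] st.2] else st.1
  match PySem.List.max? blocks List.length with
  | none => ""          -- "if not candidate_blocks: return ''"
  | some m => String.ofList m   -- max(candidate_blocks, key=len): first longest

-- ===== PORT B =====
-- the while-loop of Source B: on a True tag consume the whole run (inner while j) at once,
-- update the running best, continue after the run; on a False tag step one line
def gicAltLoop (xs : List (List Char × Bool)) (best : List Char) : List Char :=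
  match xs with
  | [] => best
  | (l, _b) :: rest =>
    if _b then
      let cand := PySem.Chars.join [' '] (l :: (rest.takeWhile (·.2)).map (·.1))
      gicAltLoop (rest.dropWhile (·.2)) (if best.length < cand.length then cand else best)
    else gicAltLoop rest best
termination_by xs.length
decreasing_by
· simpa using Nat.lt_succ_of_le (List.length_dropWhile_le _ _)
· simp

def guess_ingredients_by_commas_alt (text : String) : String :=
  let tagged := (PySem.Chars.splitOn text.toList ['\n']).map
    (fun line => let l := PySem.Chars.strip line; (l, gicPred l))
  String.ofList (gicAltLoop tagged [])

-- ===== PRECONDITION & SPEC =====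
def Spec_guess_ingredients_by_commas (text : String) (out : String) : Prop := out = guess_ingredients_by_commas_alt text
instance (text : String) (out : String) : Decidable (Spec_guess_ingredients_by_commas text out) := by unfold Spec_guess_ingredients_by_commas; infer_instance

-- ===== CLAIM (what is proved, stated in full; the proofs are below) =====
def Claim_equal_guess_ingredients_by_commas : Prop := ∀ (text : String), Dom_guess_ingredients_by_commas text → Spec_guess_ingredients_by_commas text (guess_ingredients_by_commas text)

-- ===== LEMMAS AND PROOFS =====

-- the list of blocks A's fold produces from state (blocks, cur) on remaining lines ls
def gicBlocks (ls : List (List Char)) (blocks cur : List (List Char)) : List (List Char) :=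
  let st := ls.foldl gicStep (blocks, cur)
  if st.2 ≠ [] then st.1 ++ [PySem.Chars.join [' '] st.2] else st.1

-- B's running-best update
def gicPick (best c : List Char) : List Char := if best.length < c.length then c else best

-- the line-level predicate B's tagging uses
def gicQ (line : List Char) : Bool := gicPred (PySem.Chars.strip line)

theorem gicBlocks_nil (blocks cur : List (List Char)) :
    gicBlocks [] blocks cur =
      if cur ≠ [] then blocks ++ [PySem.Chars.join [' '] cur] else blocks := rfl

theorem gicBlocks_cons (line : List Char) (ls : List (List Char)) (blocks cur : List (List Char)) :
    gicBlocks (line :: ls) blocks cur =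
      if gicQ line then gicBlocks ls blocks (cur ++ [PySem.Chars.strip line])
      else if cur ≠ [] then gicBlocks ls (blocks ++ [PySem.Chars.join [' '] cur]) []
      else gicBlocks ls blocks [] := by
  simp only [gicBlocks, List.foldl_cons, gicStep, gicQ]
  by_cases h : gicPred (PySem.Chars.strip line) <;> by_cases hc : cur = [] <;> simp [h, hc]

theorem gicBlocks_cons_pos (line : List Char) (ls : List (List Char)) (blocks cur : List (List Char))
    (h : gicQ line) :
    gicBlocks (line :: ls) blocks cur = gicBlocks ls blocks (cur ++ [PySem.Chars.strip line]) := by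
  rw [gicBlocks_cons, if_pos h]

theorem gicBlocks_cons_neg (line : List Char) (ls : List (List Char)) (blocks cur : List (List Char))
    (h : ¬ gicQ line) (hc : cur ≠ []) :
    gicBlocks (line :: ls) blocks cur = gicBlocks ls (blocks ++ [PySem.Chars.join [' '] cur]) [] := by
  rw [gicBlocks_cons, if_neg (by simp [h]), if_pos hc]

theorem gicBlocks_cons_nil (line : List Char) (ls : List (List Char)) (blocks : List (List Char))
    (h : ¬ gicQ line) :
    gicBlocks (line :: ls) blocks [] = gicBlocks ls blocks [] := by
  rw [gicBlocks_cons, if_neg (by simp [h]), if_neg (by simp)]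

theorem gicBlocks_shift (ls : List (List Char)) (blocks cur : List (List Char)) :
    gicBlocks ls blocks cur = blocks ++ gicBlocks ls [] cur := by
  induction ls generalizing blocks cur with
  | nil => by_cases hc : cur = [] <;> simp [gicBlocks_nil, hc]
  | cons line ls ih =>
    by_cases h : gicQ line
    · rw [gicBlocks_cons_pos _ _ _ _ h, gicBlocks_cons_pos _ _ _ _ h]; exact ih _ _
    · by_cases hc : cur = []
      · subst hc
        rw [gicBlocks_cons_nil _ _ _ h, gicBlocks_cons_nil _ _ _ h]; exact ih _ _
      · rw [gicBlocks_cons_neg _ _ _ _ h hc, gicBlocks_cons_neg _ _ _ _ h hc,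
          ih (blocks ++ [PySem.Chars.join [' '] cur]) [],
          ih ([] ++ [PySem.Chars.join [' '] cur]) []]
        simp [List.append_assoc]

-- a nonempty current block: A finishes the whole run of predicate lines into one joined block
theorem gicBlocks_run (ls : List (List Char)) (cur : List (List Char)) (hcur : cur ≠ []) :
    gicBlocks ls [] cur =
      PySem.Chars.join [' '] (cur ++ (ls.takeWhile gicQ).map PySem.Chars.strip)
        :: gicBlocks (ls.dropWhile gicQ) [] [] := by
  induction ls generalizing cur with
  | nil =>
    rw [List.takeWhile_nil, List.dropWhile_nil, gicBlocks_nil, gicBlocks_nil,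
      if_pos hcur, if_neg (by simp)]
    simp
  | cons line ls ih =>
    by_cases h : gicQ line
    · rw [gicBlocks_cons_pos _ _ _ _ h, List.takeWhile_cons_of_pos h, List.dropWhile_cons_of_pos h]
      rw [ih (cur ++ [PySem.Chars.strip line]) (by simp)]
      simp [List.append_assoc]
    · rw [gicBlocks_cons_neg _ _ _ _ h hcur, gicBlocks_shift,
        List.takeWhile_cons_of_neg h, List.dropWhile_cons_of_neg h,
        gicBlocks_cons_nil _ _ _ h]
      simp

-- B's loop over the tagged lines folds gicPick over exactly A's blocks
theorem gicAltLoop_eq (ls : List (List Char)) (best : List Char) :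
    gicAltLoop (ls.map (fun line => (PySem.Chars.strip line, gicPred (PySem.Chars.strip line)))) best
      = (gicBlocks ls [] []).foldl gicPick best := by
  induction hn : ls.length using Nat.strong_induction_on generalizing ls best with
  | _ n ih =>
    match ls with
    | [] => simp [gicAltLoop, gicBlocks_nil]
    | line :: ls' =>
      by_cases h : gicQ line
      · rw [List.map_cons, gicAltLoop]
        have hq : gicPred (PySem.Chars.strip line) = true := h
        simp only [hq, if_true]
        rw [List.takeWhile_map, List.dropWhile_map]
        have hfun : ((fun (p : List Char × Bool) => p.2) ∘
            (fun line => ((PySem.Chars.strip line), gicPred (PySem.Chars.strip line)))) = gicQ := by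
          funext x; rfl
        rw [hfun, List.map_map]
        have hfun2 : ((fun (p : List Char × Bool) => p.1) ∘
            (fun line => ((PySem.Chars.strip line), gicPred (PySem.Chars.strip line))))
            = PySem.Chars.strip := by funext x; rfl
        rw [hfun2]
        rw [ih ((ls'.dropWhile gicQ).length)
            (by subst hn; exact Nat.lt_succ_of_le (List.length_dropWhile_le _ _))
            (ls'.dropWhile gicQ) _ rfl]
        rw [gicBlocks_cons_pos _ _ _ _ h, List.nil_append,
          gicBlocks_run ls' [PySem.Chars.strip line] (by simp)]
        simp [gicPick]
      · rw [List.map_cons, gicAltLoop]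
        have hq : gicPred (PySem.Chars.strip line) = false := by
          simpa [gicQ] using h
        simp only [hq, Bool.false_eq_true, if_false]
        rw [ih ls'.length (by subst hn; exact Nat.lt_succ_self _) ls' _ rfl,
          gicBlocks_cons_nil _ _ _ h]

-- max(blocks, key=len) (first longest) agrees with folding the strict-improvement pick from ""
theorem gicMax_cons_cons (x y : List Char) (t : List (List Char)) :
    PySem.List.max? (x :: y :: t) List.length = PySem.List.max? (gicPick x y :: t) List.length := by
  by_cases hxy : x.length < y.length <;>
    simp [PySem.List.max?, List.foldl_cons, gicPick, hxy]

theorem gicMax_foldl (t : List (List Char)) (x : List Char) :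
    PySem.List.max? (x :: t) List.length = some (t.foldl gicPick x) := by
  induction t generalizing x with
  | nil => rfl
  | cons y t ih => rw [gicMax_cons_cons, ih, List.foldl_cons]

theorem gicPick_nil (x : List Char) : gicPick [] x = x := by
  rcases x with _ | ⟨c, cs⟩ <;> simp [gicPick]

theorem gicMax_eq (blocks : List (List Char)) :
    (match PySem.List.max? blocks List.length with
      | none => ""
      | some m => String.ofList m) = String.ofList (blocks.foldl gicPick []) := by
  rcases blocks with _ | ⟨x, t⟩
  · rfl
  · rw [gicMax_foldl, List.foldl_cons, gicPick_nil]

-- ===== VERDICT (by name: the statement is the Claim_ definition above) =====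
theorem guess_ingredients_by_commas_spec : Claim_equal_guess_ingredients_by_commas := by
  intro text _
  show (match PySem.List.max? (gicBlocks (PySem.Chars.splitOn text.toList ['\n']) [] []) List.length with
        | none => ""
        | some m => String.ofList m)
      = String.ofList (gicAltLoop ((PySem.Chars.splitOn text.toList ['\n']).map
          (fun line => (PySem.Chars.strip line, gicPred (PySem.Chars.strip line)))) [])
  rw [gicAltLoop_eq]
  exact gicMax_eq _
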